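-- pv_equiv track=rewrite | github.com/LiaozhiCheng/StanceDetection | models/access_data.py | Sort_news_by_media
-- ===== SOURCE A (Python) =====
-- def Sort_news_by_media(news_list):
--     #key:media value:news
--     media_news_dict = dict()
--     for news in news_list:
--         if news['from_name'] not in media_news_dict:
--             media_news_dict[news['from_name']] = [news]
--         else:
--             media_news_dict[news['from_name']].append(news)
--     return media_news_dict
-- ===== SOURCE B (Python) =====
-- def Sort_news_by_media(news_list):
--     # Two-pass grouping: collect distinct media names in first-occurrence order,
--     # then build each group with one filter pass per name.
--     keys = []
--     for news in news_list:
--         k = news['from_name']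
--         if k not in keys:
--             keys.append(k)
--     return {k: [news for news in news_list if news['from_name'] == k] for k in keys}
-- ===== Notes on version B (the rewrite author's own statement) =====
-- stated objective: alternative
-- what changed: Replaces A's single-pass dict accumulation (insert-or-append per item) by a two-pass scheme: first collect the distinct media names in first-occurrence order, then build each group with a separate filter pass over the whole list.
import Mathlib
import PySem

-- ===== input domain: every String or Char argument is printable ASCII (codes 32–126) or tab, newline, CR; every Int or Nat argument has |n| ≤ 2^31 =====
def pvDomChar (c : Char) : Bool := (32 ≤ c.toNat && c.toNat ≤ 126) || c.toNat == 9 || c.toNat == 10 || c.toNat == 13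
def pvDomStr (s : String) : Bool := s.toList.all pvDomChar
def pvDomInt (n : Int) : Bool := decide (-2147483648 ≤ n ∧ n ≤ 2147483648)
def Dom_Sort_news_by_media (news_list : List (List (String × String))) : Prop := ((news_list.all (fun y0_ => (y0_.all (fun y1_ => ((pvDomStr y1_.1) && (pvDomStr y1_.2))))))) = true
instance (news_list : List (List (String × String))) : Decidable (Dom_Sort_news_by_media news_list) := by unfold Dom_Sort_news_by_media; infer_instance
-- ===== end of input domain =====

-- B groups by two passes (distinct names first, then one filter per name) instead of A's
-- single-pass dict accumulation; same result, alternative decomposition (not faster).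

-- news['from_name'] : first-match lookup in the association list, total under Pre_ below
def pvKey (news : List (String × String)) : String :=
  (List.lookup "from_name" news).getD ""

-- ===== PORT A =====
def Sort_news_by_media (news_list : List (List (String × String))) : List (String × List (List (String × String))) :=
  (news_list.foldl
    (fun media_news_dict news =>
      if (media_news_dict.contains (pvKey news)) = false then
        media_news_dict.insert (pvKey news) [news]
      else
        -- media_news_dict[news['from_name']].append(news)
        media_news_dict.modify (pvKey news) [] (fun v => v ++ [news]))
    (PySem.Dict.empty : PySem.Dict String (List (List (String × String))))).items

-- ===== PORT B =====
def Sort_news_by_media_alt (news_list : List (List (String × String))) : List (String × List (List (String × String))) :=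
  let keys := news_list.foldl (fun ks news => PySem.Set.add ks (pvKey news)) []
  keys.map (fun k => (k, news_list.filter (fun news => pvKey news == k)))

-- ===== PRECONDITION & SPEC =====
-- Pre_ excludes exactly the inputs where some news dict lacks the key 'from_name':
-- there the Python A (and B) raise KeyError.
def Pre_Sort_news_by_media (news_list : List (List (String × String))) : Prop :=
  (news_list.all (fun news => (List.lookup "from_name" news).isSome)) = true
instance (news_list : List (List (String × String))) : Decidable (Pre_Sort_news_by_media news_list) := by unfold Pre_Sort_news_by_media; infer_instance

def pvWitness_Sort_news_by_media : (List (List (String × String))) :=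
  [[("from_name", "cnn"), ("title", "a")], [("from_name", "bbc")], [("from_name", "cnn"), ("title", "b")]]

def Spec_Sort_news_by_media (news_list : List (List (String × String))) (out : List (String × List (List (String × String)))) : Prop := out = Sort_news_by_media_alt news_list
instance (news_list : List (List (String × String))) (out : List (String × List (List (String × String)))) : Decidable (Spec_Sort_news_by_media news_list out) := by unfold Spec_Sort_news_by_media; infer_instance

-- ===== CLAIM (what is proved, stated in full; the proofs are below) =====
def Claim_equal_Sort_news_by_media : Prop := ∀ (news_list : List (List (String × String))), Dom_Sort_news_by_media news_list → Pre_Sort_news_by_media news_list → Spec_Sort_news_by_media news_list (Sort_news_by_media news_list)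

-- ===== LEMMAS AND PROOFS =====

-- A's loop body is exactly 'modify': on a fresh key the default [] makes insert [news] = modify
theorem pvStep_eq_modify (d : PySem.Dict String (List (List (String × String)))) (news : List (String × String)) :
    (if (d.contains (pvKey news)) = false then
        d.insert (pvKey news) [news]
      else
        d.modify (pvKey news) [] (fun v => v ++ [news]))
    = d.modify (pvKey news) [] (fun v => v ++ [news]) := by
  by_cases h : d.contains (pvKey news) = false
  · simp [PySem.Dict.modify, PySem.Dict.getD_of_not_contains, h]
  · simp [h]

theorem Sort_news_by_media_spec_aux (news_list : List (List (String × String))) :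
    Sort_news_by_media news_list = Sort_news_by_media_alt news_list := by
  unfold Sort_news_by_media Sort_news_by_media_alt
  have hfold :
      news_list.foldl
        (fun media_news_dict news =>
          if (media_news_dict.contains (pvKey news)) = false then
            media_news_dict.insert (pvKey news) [news]
          else
            media_news_dict.modify (pvKey news) [] (fun v => v ++ [news]))
        (PySem.Dict.empty : PySem.Dict String (List (List (String × String))))
      = news_list.foldl
          (fun d news => d.modify (pvKey news) [] (fun v => v ++ [news]))
          PySem.Dict.empty := by
    apply PySem.List.foldl_congr_mem
    intros
    exact pvStep_eq_modify _ _
  rw [hfold]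
  set D := news_list.foldl
      (fun d news => d.modify (pvKey news) [] (fun v => v ++ [news]))
      (PySem.Dict.empty : PySem.Dict String (List (List (String × String)))) with hD
  have hnd : D.keys.Nodup := by
    rw [hD]
    exact PySem.Dict.nodup_keys_foldl_modify_key news_list pvKey []
      (fun d news v => v ++ [news]) PySem.Dict.empty (by simp [pysem])
  have hkeys : D.keys = news_list.foldl (fun ks news => PySem.Set.add ks (pvKey news)) [] := by
    rw [hD, PySem.Dict.keys_foldl_modify_key, ← PySem.Set.update_map_eq_foldl_add]
    simp [pysem]
  have hgetD : ∀ k : String, D.getD k [] = news_list.filter (fun news => pvKey news == k) := by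
    intro k
    rw [hD]
    have hm : news_list.foldl
        (fun d news => d.modify (pvKey news) [] (fun v => v ++ [news]))
        (PySem.Dict.empty : PySem.Dict String (List (List (String × String))))
      = (news_list.map (fun news => (pvKey news, news))).foldl
          (fun d p => d.modify p.1 [] (fun v => v ++ [p.2])) PySem.Dict.empty := by
      rw [List.foldl_map]
    rw [hm, PySem.Dict.getD_foldl_modify_append]
    simp [List.filter_map, Function.comp_def]
  rw [PySem.Dict.items_eq_map_keys D hnd []]
  rw [hkeys]
  apply List.map_congr_left
  intro k _
  rw [hgetD k]

-- ===== VERDICT (by name: the statement is the Claim_ definition above) =====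
theorem Sort_news_by_media_spec : Claim_equal_Sort_news_by_media := by
  intro news_list _ _
  exact Sort_news_by_media_spec_aux news_list
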